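-- pv_equiv track=rewrite | github.com/kanhaiyaagarwal/badminton-analyser | api/features/workout/services/chat_agent.py | _match_exercise_in_message
-- ===== SOURCE A (Python) =====
-- from typing import Optional
--
-- def _match_exercise_in_message(msg: str, exercises: list) -> Optional[dict]:
--     """Try to find which exercise from the plan the user is referring to."""
--     msg = msg.lower()
--
--     # Exact name match
--     for ex in exercises:
--         name = ex.get("name", "").lower()
--         if name and name in msg:
--             return ex
--
--     # Slug match (e.g., "bench-press" or "bench press")
--     for ex in exercises:
--         slug = ex.get("slug", "").lower()
--         if slug and (slug in msg or slug.replace("-", " ") in msg):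
--             return ex
--
--     # Fuzzy: any significant word from exercise name
--     for ex in exercises:
--         name = ex.get("name", "").lower()
--         words = [w for w in name.split() if len(w) > 3]
--         if any(w in msg for w in words):
--             return ex
--
--     return None
-- ===== SOURCE B (Python) =====
-- from typing import Optional
--
--
-- def _match_tier(msg: str, ex: dict) -> int:
--     """Rank how well one exercise matches the (lowercased) message: 1 best, 4 = no match."""
--     name = ex.get("name", "").lower()
--     if name and name in msg:
--         return 1
--     slug = ex.get("slug", "").lower()
--     if slug and (slug in msg or slug.replace("-", " ") in msg):
--         return 2
--     if any(len(w) > 3 and w in msg for w in name.split()):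
--         return 3
--     return 4
--
--
-- def _match_exercise_in_message(msg: str, exercises: list) -> Optional[dict]:
--     """One pass: keep the first exercise attaining the smallest match tier."""
--     msg = msg.lower()
--     best, best_tier = None, 4
--     for ex in exercises:
--         tier = _match_tier(msg, ex)
--         if tier < best_tier:
--             best, best_tier = ex, tier
--     return best
-- ===== Notes on version B (the rewrite author's own statement) =====
-- stated objective: alternative
-- what changed: Replaced A's three sequential early-return scans over the exercise list by a single pass that computes a match tier (1 name, 2 slug, 3 fuzzy word, 4 none) per exercise and keeps the first exercise with the strictly smallest tier.
import Mathlib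
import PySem

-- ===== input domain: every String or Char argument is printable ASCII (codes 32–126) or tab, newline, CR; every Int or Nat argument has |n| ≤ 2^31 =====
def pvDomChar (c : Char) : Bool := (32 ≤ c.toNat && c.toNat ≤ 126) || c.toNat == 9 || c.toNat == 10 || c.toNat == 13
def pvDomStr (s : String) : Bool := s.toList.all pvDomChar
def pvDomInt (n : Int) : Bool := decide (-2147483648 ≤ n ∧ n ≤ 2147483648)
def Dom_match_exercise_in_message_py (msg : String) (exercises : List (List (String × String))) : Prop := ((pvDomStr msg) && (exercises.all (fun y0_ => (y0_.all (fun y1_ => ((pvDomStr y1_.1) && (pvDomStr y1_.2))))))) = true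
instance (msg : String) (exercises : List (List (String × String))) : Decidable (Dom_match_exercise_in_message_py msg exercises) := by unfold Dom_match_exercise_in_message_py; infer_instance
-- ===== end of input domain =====

-- B replaces A's three sequential early-return scans by one pass ranking each exercise
-- by a match tier and keeping the first exercise with the smallest tier (alternative, same cost).

-- ===== PORT A =====
-- ex.get(k, "").lower()
def pvExGet (ex : List (String × String)) (k : String) : String :=
  PySem.Str.lower ((PySem.Dict.ofList ex).getD k "")

-- 'name and name in msg'
def pvCondName (m : String) (ex : List (String × String)) : Bool :=
  let name := pvExGet ex "name"
  (name ≠ "" : Bool) && PySem.Str.isIn name m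

-- 'slug and (slug in msg or slug.replace("-", " ") in msg)'
def pvCondSlug (m : String) (ex : List (String × String)) : Bool :=
  let slug := pvExGet ex "slug"
  (slug ≠ "" : Bool) && (PySem.Str.isIn slug m || PySem.Str.isIn (PySem.Str.replace slug "-" " ") m)

-- first loop of A (early return)
def pvScanName (m : String) : List (List (String × String)) → Option (List (String × String))
  | [] => none
  | ex :: rest => if pvCondName m ex then some ex else pvScanName m rest

-- second loop of A
def pvScanSlug (m : String) : List (List (String × String)) → Option (List (String × String))
  | [] => none
  | ex :: rest => if pvCondSlug m ex then some ex else pvScanSlug m rest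

-- third loop of A: words = [w for w in name.split() if len(w) > 3]; any(w in msg for w in words)
def pvScanFuzzy (m : String) : List (List (String × String)) → Option (List (String × String))
  | [] => none
  | ex :: rest =>
    let words := (PySem.Str.split₀ (pvExGet ex "name")).filter (fun w => decide (3 < PySem.Str.len w))
    if words.any (fun w => PySem.Str.isIn w m) then some ex else pvScanFuzzy m rest

def match_exercise_in_message_py (msg : String) (exercises : List (List (String × String))) : Option (List (String × String)) :=
  let m := PySem.Str.lower msg
  match pvScanName m exercises with
  | some ex => some ex
  | none =>
    match pvScanSlug m exercises with
    | some ex => some ex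
    | none => pvScanFuzzy m exercises

-- ===== PORT B =====
-- _match_tier: early-return chain ranking one exercise
def pvTier (m : String) (ex : List (String × String)) : Nat :=
  if pvCondName m ex then 1
  else if pvCondSlug m ex then 2
  else if (PySem.Str.split₀ (pvExGet ex "name")).any
            (fun w => decide (3 < PySem.Str.len w) && PySem.Str.isIn w m) then 3
  else 4

def match_exercise_in_message_py_alt (msg : String) (exercises : List (List (String × String))) : Option (List (String × String)) :=
  let m := PySem.Str.lower msg
  (exercises.foldl
    (fun (st : Option (List (String × String)) × Nat) ex =>
      let t := pvTier m ex
      if t < st.2 then (some ex, t) else st)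
    (none, 4)).1

-- ===== PRECONDITION & SPEC =====
def Spec_match_exercise_in_message_py (msg : String) (exercises : List (List (String × String))) (out : Option (List (String × String))) : Prop := out = match_exercise_in_message_py_alt msg exercises
instance (msg : String) (exercises : List (List (String × String))) (out : Option (List (String × String))) : Decidable (Spec_match_exercise_in_message_py msg exercises out) := by unfold Spec_match_exercise_in_message_py; infer_instance

-- ===== CLAIM (what is proved, stated in full; the proofs are below) =====
def Claim_equal_match_exercise_in_message_py : Prop := ∀ (msg : String) (exercises : List (List (String × String))), Dom_match_exercise_in_message_py msg exercises → Spec_match_exercise_in_message_py msg exercises (match_exercise_in_message_py msg exercises)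

-- ===== LEMMAS AND PROOFS =====

-- the loop body of B's fold, named for the proofs (definitionally the port's lambda)
def pvStep (m : String) (st : Option (List (String × String)) × Nat)
    (ex : List (String × String)) : Option (List (String × String)) × Nat :=
  let t := pvTier m ex
  if t < st.2 then (some ex, t) else st

-- filter-then-any = any of the conjunction
lemma pvAnyFilter {α : Type} (l : List α) (p q : α → Bool) :
    (l.filter p).any q = l.any (fun a => p a && q a) := by
  induction l with
  | nil => rfl
  | cons a l ih => by_cases h : p a <;> simp [h, ih]

-- B's fuzzy condition equals A's
lemma pvCondFuzzy_eq (m : String) (ex : List (String × String)) :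
    ((PySem.Str.split₀ (pvExGet ex "name")).any
        (fun w => decide (3 < PySem.Str.len w) && PySem.Str.isIn w m))
      = ((PySem.Str.split₀ (pvExGet ex "name")).filter (fun w => decide (3 < PySem.Str.len w))).any
          (fun w => PySem.Str.isIn w m) :=
  (pvAnyFilter _ _ _).symm

-- characterisation of B's fold from an arbitrary state (tier ≤ 4), via A's three scans
lemma pvLoop_char (m : String) (exs : List (List (String × String))) :
    ∀ (b : Option (List (String × String))) (tb : Nat), tb ≤ 4 →
    (exs.foldl (pvStep m) (b, tb)).1
    = (match pvScanName m exs with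
       | some e => if 1 < tb then some e else b
       | none =>
         match pvScanSlug m exs with
         | some e => if 2 < tb then some e else b
         | none =>
           match pvScanFuzzy m exs with
           | some e => if 3 < tb then some e else b
           | none => b) := by
  induction exs with
  | nil => intro b tb _; rfl
  | cons ex rest ih =>
    intro b tb htb4
    rw [List.foldl_cons]
    by_cases h1 : pvCondName m ex
    · by_cases htb : 1 < tb
      · have hF : pvStep m (b, tb) ex = (some ex, 1) := by
          simp [pvStep, pvTier, h1, htb]
        rw [hF, ih (some ex) 1 (by omega)]
        simp only [pvScanName, h1, if_true]
        cases hn : pvScanName m rest <;> cases hs : pvScanSlug m rest <;>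
          cases hf : pvScanFuzzy m rest <;> simp [htb]
      · have e1 : ¬ (1 : Nat) < tb := htb
        have e2 : ¬ (2 : Nat) < tb := by omega
        have e3 : ¬ (3 : Nat) < tb := by omega
        have hF : pvStep m (b, tb) ex = (b, tb) := by
          simp [pvStep, pvTier, h1, htb]
        rw [hF, ih b tb htb4]
        simp only [pvScanName, h1, if_true]
        cases hn : pvScanName m rest <;> cases hs : pvScanSlug m rest <;>
          cases hf : pvScanFuzzy m rest <;> simp [e1, e2, e3]
    · by_cases h2 : pvCondSlug m ex
      · by_cases htb : 2 < tb
        · have e1 : (1 : Nat) < tb := by omega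
          have hF : pvStep m (b, tb) ex = (some ex, 2) := by
            simp [pvStep, pvTier, h1, h2, htb]
          rw [hF, ih (some ex) 2 (by omega)]
          simp only [pvScanName, pvScanSlug, h1, h2, if_true, if_false, Bool.false_eq_true]
          cases hn : pvScanName m rest <;> cases hs : pvScanSlug m rest <;>
            cases hf : pvScanFuzzy m rest <;> simp [htb, e1]
        · have e2 : ¬ (2 : Nat) < tb := htb
          have e3 : ¬ (3 : Nat) < tb := by omega
          have hF : pvStep m (b, tb) ex = (b, tb) := by
            simp [pvStep, pvTier, h1, h2, htb]
          rw [hF, ih b tb htb4]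
          simp only [pvScanName, pvScanSlug, h1, h2, if_true, if_false, Bool.false_eq_true]
          cases hn : pvScanName m rest <;> cases hs : pvScanSlug m rest <;>
            cases hf : pvScanFuzzy m rest <;> simp [e2, e3]
      · by_cases h3 : ((PySem.Str.split₀ (pvExGet ex "name")).any
            (fun w => decide (3 < PySem.Str.len w) && PySem.Str.isIn w m))
        · have h3f : (((PySem.Str.split₀ (pvExGet ex "name")).filter
              (fun w => decide (3 < PySem.Str.len w))).any (fun w => PySem.Str.isIn w m)) := by
            rw [← pvCondFuzzy_eq]; exact h3
          by_cases htb : 3 < tb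
          · have e1 : (1 : Nat) < tb := by omega
            have e2 : (2 : Nat) < tb := by omega
            have hF : pvStep m (b, tb) ex = (some ex, 3) := by
              simp only [pvStep, pvTier, h1, h2, h3, Bool.false_eq_true, if_false, if_true]; simp [htb]
            rw [hF, ih (some ex) 3 (by omega)]
            simp only [pvScanName, pvScanSlug, pvScanFuzzy, h1, h2, h3f, if_true, if_false,
              Bool.false_eq_true]
            cases hn : pvScanName m rest <;> cases hs : pvScanSlug m rest <;>
              cases hf : pvScanFuzzy m rest <;> simp [htb, e1, e2]
          · have e3 : ¬ (3 : Nat) < tb := htb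
            have hF : pvStep m (b, tb) ex = (b, tb) := by
              simp only [pvStep, pvTier, h1, h2, h3, Bool.false_eq_true, if_false, if_true]; simp [htb]
            rw [hF, ih b tb htb4]
            simp only [pvScanName, pvScanSlug, pvScanFuzzy, h1, h2, h3f, if_true, if_false,
              Bool.false_eq_true]
            cases hn : pvScanName m rest <;> cases hs : pvScanSlug m rest <;>
              cases hf : pvScanFuzzy m rest <;> simp [e3]
        · have h3f : ¬ (((PySem.Str.split₀ (pvExGet ex "name")).filter
              (fun w => decide (3 < PySem.Str.len w))).any (fun w => PySem.Str.isIn w m)) := by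
            rw [← pvCondFuzzy_eq]; exact h3
          have e4 : ¬ (4 : Nat) < tb := by omega
          have hF : pvStep m (b, tb) ex = (b, tb) := by
            simp only [pvStep, pvTier, h1, h2, h3, Bool.false_eq_true, if_false, if_true]; simp [e4]
          rw [hF, ih b tb htb4]
          simp only [pvScanName, pvScanSlug, pvScanFuzzy, h1, h2, h3f, if_false,
            Bool.false_eq_true]

-- ===== VERDICT (by name: the statement is the Claim_ definition above) =====
theorem match_exercise_in_message_py_spec : Claim_equal_match_exercise_in_message_py := by
  intro msg exercises _
  unfold Spec_match_exercise_in_message_py match_exercise_in_message_py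
  have halt : match_exercise_in_message_py_alt msg exercises
      = (exercises.foldl (pvStep (PySem.Str.lower msg)) (none, 4)).1 := rfl
  rw [halt, pvLoop_char _ _ _ 4 (by omega)]
  cases hn : pvScanName (PySem.Str.lower msg) exercises <;>
    cases hs : pvScanSlug (PySem.Str.lower msg) exercises <;>
      cases hf : pvScanFuzzy (PySem.Str.lower msg) exercises <;>
        simp [hn, hs, hf]
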